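/- GENERATED by tools/mkclosed.py from the statements of the program gif (Gif/Spec/Units/*.lean) — do not edit; re-run it when a statement changes.
   THE BOTTOM-UP COMPOSITION: every unit's contract with no hypothesis about a callee left, from the unit theorems, in a
   topological order of the hypotheses (181 units, 39 functions). -/
import Gif.ClosedSpec
import ProgX.Base.Spec.Proved.asan_register_globals_generic
import Gif.Spec.Proved.DGifBufferedInput_1
import Gif.Spec.Proved.DGifBufferedInput_E
import Gif.Spec.Proved.DGifCloseFile_5
import Gif.Spec.Proved.DGifDecompressInput_1
import Gif.Spec.Proved.DGifDecompressInput_3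
import Gif.Spec.Proved.DGifDecompressInput_E
import Gif.Spec.Proved.DGifDecompressInput_P
import Gif.Spec.Proved.DGifDecompressLine_1
import Gif.Spec.Proved.DGifDecompressLine_10
import Gif.Spec.Proved.DGifDecompressLine_11
import Gif.Spec.Proved.DGifDecompressLine_12
import Gif.Spec.Proved.DGifDecompressLine_13
import Gif.Spec.Proved.DGifDecompressLine_2
import Gif.Spec.Proved.DGifDecompressLine_4
import Gif.Spec.Proved.DGifDecompressLine_5
import Gif.Spec.Proved.DGifDecompressLine_6
import Gif.Spec.Proved.DGifDecompressLine_7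
import Gif.Spec.Proved.DGifDecompressLine_E
import Gif.Spec.Proved.DGifDecompressLine_P
import Gif.Spec.Proved.DGifDecreaseImageCounter_1
import Gif.Spec.Proved.DGifDecreaseImageCounter_E
import Gif.Spec.Proved.DGifGetCodeNext_E
import Gif.Spec.Proved.DGifGetCodeNext_P
import Gif.Spec.Proved.DGifGetExtensionNext_E
import Gif.Spec.Proved.DGifGetExtensionNext_P
import Gif.Spec.Proved.DGifGetExtension_E
import Gif.Spec.Proved.DGifGetExtension_P
import Gif.Spec.Proved.DGifGetImageDesc_3
import Gif.Spec.Proved.DGifGetImageDesc_4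
import Gif.Spec.Proved.DGifGetImageDesc_6
import Gif.Spec.Proved.DGifGetImageDesc_E
import Gif.Spec.Proved.DGifGetImageHeader_5
import Gif.Spec.Proved.DGifGetImageHeader_E
import Gif.Spec.Proved.DGifGetImageHeader_P
import Gif.Spec.Proved.DGifGetLine_1
import Gif.Spec.Proved.DGifGetLine_E
import Gif.Spec.Proved.DGifGetLine_P
import Gif.Spec.Proved.DGifGetPrefixChar
import Gif.Spec.Proved.DGifGetRecordType_2
import Gif.Spec.Proved.DGifGetRecordType_E
import Gif.Spec.Proved.DGifGetRecordType_P
import Gif.Spec.Proved.DGifGetScreenDesc_3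
import Gif.Spec.Proved.DGifGetScreenDesc_6
import Gif.Spec.Proved.DGifGetScreenDesc_E
import Gif.Spec.Proved.DGifGetScreenDesc_P
import Gif.Spec.Proved.DGifGetWord_E
import Gif.Spec.Proved.DGifGetWord_P
import Gif.Spec.Proved.DGifOpen_1
import Gif.Spec.Proved.DGifOpen_2
import Gif.Spec.Proved.DGifOpen_E
import Gif.Spec.Proved.DGifOpen_P
import Gif.Spec.Proved.DGifSetupDecompress_2
import Gif.Spec.Proved.DGifSetupDecompress_3
import Gif.Spec.Proved.DGifSetupDecompress_E
import Gif.Spec.Proved.DGifSetupDecompress_P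
import Gif.Spec.Proved.DGifSlurp_1
import Gif.Spec.Proved.DGifSlurp_12
import Gif.Spec.Proved.DGifSlurp_7
import Gif.Spec.Proved.DGifSlurp_9
import Gif.Spec.Proved.DGifSlurp_E
import Gif.Spec.Proved.DGifSlurp_P
import Gif.Spec.Proved.GifAddExtensionBlock_2
import Gif.Spec.Proved.GifAddExtensionBlock_3
import Gif.Spec.Proved.GifAddExtensionBlock_E
import Gif.Spec.Proved.GifBitSize
import Gif.Spec.Proved.GifFreeExtensions_1
import Gif.Spec.Proved.GifFreeExtensions_2
import Gif.Spec.Proved.GifFreeExtensions_COMPOSITION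
import Gif.Spec.Proved.GifFreeMapObject
import Gif.Spec.Proved.GifFreeSavedImages_1
import Gif.Spec.Proved.GifFreeSavedImages_2
import Gif.Spec.Proved.GifFreeSavedImages_3
import Gif.Spec.Proved.GifFreeSavedImages_COMPOSITION
import Gif.Spec.Proved.GifMakeMapObject_1
import Gif.Spec.Proved.GifMakeMapObject_2
import Gif.Spec.Proved.GifMakeMapObject_E
import Gif.Spec.Proved.digest_byte
import Gif.Spec.Proved.digest_bytes
import Gif.Spec.Proved.digest_extensions_E
import Gif.Spec.Proved.digest_int
import Gif.Spec.Proved.digest_map_1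
import Gif.Spec.Proved.digest_map_2
import Gif.Spec.Proved.digest_map_E
import Gif.Spec.Proved.gif_decode_1
import Gif.Spec.Proved.gif_decode_E
import Gif.Spec.Proved.gif_decode_P
import Gif.Spec.Proved.mem_read
import Gif.Spec.Proved.openbsd_reallocarray
import Gif.Spec.Proved.prog_main_E
import Gif.Spec.Proved.prog_main_P
import Gif.Spec.Proved.strncmp
import Gif.Spec.Proved.sub_I_65535_1
import Gif.Spec.Proved.DGifCloseFile_1
import Gif.Spec.Proved.DGifCloseFile_2
import Gif.Spec.Proved.DGifCloseFile_3
import Gif.Spec.Proved.DGifCloseFile_4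
import Gif.Spec.Proved.DGifCloseFile_COMPOSITION
import Gif.Spec.Proved.DGifDecompressLine_14
import Gif.Spec.Proved.DGifDecompressLine_15
import Gif.Spec.Proved.DGifDecompressLine_8
import Gif.Spec.Proved.DGifDecompressLine_9
import Gif.Spec.Proved.DGifDecreaseImageCounter_2
import Gif.Spec.Proved.DGifDecreaseImageCounter_3
import Gif.Spec.Proved.DGifDecreaseImageCounter_COMPOSITION
import Gif.Spec.Proved.DGifGetImageDesc_2
import Gif.Spec.Proved.DGifOpen_4
import Gif.Spec.Proved.DGifSlurp_4
import Gif.Spec.Proved.DGifSlurp_5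
import Gif.Spec.Proved.GifAddExtensionBlock_1
import Gif.Spec.Proved.GifAddExtensionBlock_COMPOSITION
import Gif.Spec.Proved.GifMakeMapObject_COMPOSITION
import Gif.Spec.Proved.InternalRead
import Gif.Spec.Proved.digest_extensions_1
import Gif.Spec.Proved.digest_extensions_2
import Gif.Spec.Proved.digest_extensions_COMPOSITION
import Gif.Spec.Proved.digest_file_1
import Gif.Spec.Proved.digest_file_2
import Gif.Spec.Proved.digest_file_4
import Gif.Spec.Proved.digest_file_5
import Gif.Spec.Proved.digest_file_7
import Gif.Spec.Proved.digest_map_COMPOSITION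
import Gif.Spec.Proved.gif_decode_5
import Gif.Spec.Proved.run_ctors
import Gif.Spec.Proved.DGifBufferedInput_2
import Gif.Spec.Proved.DGifBufferedInput_3
import Gif.Spec.Proved.DGifBufferedInput_COMPOSITION
import Gif.Spec.Proved.DGifDecompressInput_2
import Gif.Spec.Proved.DGifDecompressInput_COMPOSITION
import Gif.Spec.Proved.DGifDecompressLine_3
import Gif.Spec.Proved.DGifDecompressLine_COMPOSITION
import Gif.Spec.Proved.DGifGetCodeNext_1
import Gif.Spec.Proved.DGifGetCodeNext_2
import Gif.Spec.Proved.DGifGetCodeNext_COMPOSITION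
import Gif.Spec.Proved.DGifGetExtensionNext_1
import Gif.Spec.Proved.DGifGetExtensionNext_2
import Gif.Spec.Proved.DGifGetExtensionNext_COMPOSITION
import Gif.Spec.Proved.DGifGetExtension_1
import Gif.Spec.Proved.DGifGetExtension_2
import Gif.Spec.Proved.DGifGetExtension_COMPOSITION
import Gif.Spec.Proved.DGifGetImageDesc_5
import Gif.Spec.Proved.DGifGetImageHeader_3
import Gif.Spec.Proved.DGifGetImageHeader_4
import Gif.Spec.Proved.DGifGetLine_2
import Gif.Spec.Proved.DGifGetLine_3
import Gif.Spec.Proved.DGifGetLine_COMPOSITION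
import Gif.Spec.Proved.DGifGetRecordType_1
import Gif.Spec.Proved.DGifGetRecordType_COMPOSITION
import Gif.Spec.Proved.DGifGetScreenDesc_2
import Gif.Spec.Proved.DGifGetScreenDesc_4
import Gif.Spec.Proved.DGifGetScreenDesc_5
import Gif.Spec.Proved.DGifGetWord_1
import Gif.Spec.Proved.DGifGetWord_COMPOSITION
import Gif.Spec.Proved.DGifOpen_3
import Gif.Spec.Proved.DGifSetupDecompress_1
import Gif.Spec.Proved.DGifSetupDecompress_COMPOSITION
import Gif.Spec.Proved.DGifSlurp_10
import Gif.Spec.Proved.DGifSlurp_11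
import Gif.Spec.Proved.DGifSlurp_2
import Gif.Spec.Proved.DGifSlurp_6
import Gif.Spec.Proved.DGifSlurp_8
import Gif.Spec.Proved.digest_file_3
import Gif.Spec.Proved.digest_file_6
import Gif.Spec.Proved.digest_file_COMPOSITION
import Gif.Spec.Proved.gif_decode_4
import Gif.Spec.Proved.DGifGetImageHeader_1
import Gif.Spec.Proved.DGifGetImageHeader_2
import Gif.Spec.Proved.DGifGetImageHeader_6
import Gif.Spec.Proved.DGifGetImageHeader_COMPOSITION
import Gif.Spec.Proved.DGifGetScreenDesc_1
import Gif.Spec.Proved.DGifGetScreenDesc_COMPOSITION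
import Gif.Spec.Proved.DGifOpen_5
import Gif.Spec.Proved.DGifOpen_COMPOSITION
import Gif.Spec.Proved.gif_decode_2
import Gif.Spec.Proved.DGifGetImageDesc_1
import Gif.Spec.Proved.DGifGetImageDesc_COMPOSITION
import Gif.Spec.Proved.DGifSlurp_3
import Gif.Spec.Proved.DGifSlurp_COMPOSITION
import Gif.Spec.Proved.gif_decode_3
import Gif.Spec.Proved.gif_decode_COMPOSITION
import Gif.Spec.Proved.prog_main_1
import Gif.Spec.Proved.prog_main_COMPOSITION
namespace Gif.Closed
open X86 X86.User Asan Gif.Spec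

/-- **THE COMPOSITION**: one line per unit, callees before callers. -/
theorem closed (Lay : Layout) (hLay : Lay.hi = 0x1000000) (μ : Microarch) (hμ : UserX.MicroOK μ) (u₀ : State)
    (hcode : AllCode Lay u₀) (hgiven : ProgX.Base.Closed.Contracts Lay μ u₀) : Contracts Lay μ u₀ := by
  have h_asan_register_globals := ProgX.Base.Spec.Proved.asan_register_globals_generic_ok Lay hLay μ hμ u₀ hcode.asan_register_globals Gif.Spec.rt (by decide) (by decide)
  have h_DGifBufferedInput_1 := Gif.Spec.Proved.DGifBufferedInput_1_ok Lay hLay μ hμ u₀ hcode.DGifBufferedInput hgiven.asan_load1_noabort hgiven.asan_store1_noabort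
  have h_DGifBufferedInput_E := Gif.Spec.Proved.DGifBufferedInput_E_ok Lay hLay μ hμ u₀ hcode.DGifBufferedInput
  have h_DGifCloseFile_5 := Gif.Spec.Proved.DGifCloseFile_5_ok Lay hLay μ hμ u₀ hcode.DGifCloseFile hgiven.asan_load8_noabort hgiven.asan_load4_noabort hgiven.free hgiven.asan_store4_noabort
  have h_DGifDecompressInput_1 := Gif.Spec.Proved.DGifDecompressInput_1_ok Lay hLay μ hμ u₀ hcode.DGifDecompressInput hgiven.asan_load8_noabort hgiven.asan_load4_noabort hgiven.asan_store4_noabort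
  have h_DGifDecompressInput_3 := Gif.Spec.Proved.DGifDecompressInput_3_ok Lay hLay μ hμ u₀ hcode.DGifDecompressInput hgiven.asan_load8_noabort hgiven.asan_load2_noabort hgiven.asan_store4_noabort hgiven.asan_load4_noabort
  have h_DGifDecompressInput_E := Gif.Spec.Proved.DGifDecompressInput_E_ok Lay hLay μ hμ u₀ hcode.DGifDecompressInput
  have h_DGifDecompressInput_P := Gif.Spec.Proved.DGifDecompressInput_P_ok Lay hLay μ hμ u₀ hcode.DGifDecompressInput
  have h_DGifDecompressLine_1 := Gif.Spec.Proved.DGifDecompressLine_1_ok Lay hLay μ hμ u₀ hcode.DGifDecompressLine hgiven.asan_load8_noabort hgiven.asan_load4_noabort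
  have h_DGifDecompressLine_10 := Gif.Spec.Proved.DGifDecompressLine_10_ok Lay hLay μ hμ u₀ hcode.DGifDecompressLine hgiven.asan_load1_noabort hgiven.asan_store1_noabort hgiven.asan_load4_noabort
  have h_DGifDecompressLine_11 := Gif.Spec.Proved.DGifDecompressLine_11_ok Lay hLay μ hμ u₀ hcode.DGifDecompressLine hgiven.asan_store1_noabort hgiven.asan_store4_noabort
  have h_DGifDecompressLine_12 := Gif.Spec.Proved.DGifDecompressLine_12_ok Lay hLay μ hμ u₀ hcode.DGifDecompressLine hgiven.asan_load1_noabort hgiven.asan_store1_noabort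
  have h_DGifDecompressLine_13 := Gif.Spec.Proved.DGifDecompressLine_13_ok Lay hLay μ hμ u₀ hcode.DGifDecompressLine hgiven.asan_load4_noabort
  have h_DGifDecompressLine_2 := Gif.Spec.Proved.DGifDecompressLine_2_ok Lay hLay μ hμ u₀ hcode.DGifDecompressLine hgiven.asan_load1_noabort hgiven.asan_store1_noabort
  have h_DGifDecompressLine_4 := Gif.Spec.Proved.DGifDecompressLine_4_ok Lay hLay μ hμ u₀ hcode.DGifDecompressLine hgiven.asan_store4_noabort hgiven.asan_store1_noabort
  have h_DGifDecompressLine_5 := Gif.Spec.Proved.DGifDecompressLine_5_ok Lay hLay μ hμ u₀ hcode.DGifDecompressLine hgiven.asan_store4_noabort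
  have h_DGifDecompressLine_6 := Gif.Spec.Proved.DGifDecompressLine_6_ok Lay hLay μ hμ u₀ hcode.DGifDecompressLine hgiven.asan_load4_noabort hgiven.asan_store4_noabort
  have h_DGifDecompressLine_7 := Gif.Spec.Proved.DGifDecompressLine_7_ok Lay hLay μ hμ u₀ hcode.DGifDecompressLine hgiven.asan_load4_noabort
  have h_DGifDecompressLine_E := Gif.Spec.Proved.DGifDecompressLine_E_ok Lay hLay μ hμ u₀ hcode.DGifDecompressLine
  have h_DGifDecompressLine_P := Gif.Spec.Proved.DGifDecompressLine_P_ok Lay hLay μ hμ u₀ hcode.DGifDecompressLine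
  have h_DGifDecreaseImageCounter_1 := Gif.Spec.Proved.DGifDecreaseImageCounter_1_ok Lay hLay μ hμ u₀ hcode.DGifDecreaseImageCounter hgiven.free hgiven.asan_load4_noabort hgiven.asan_load8_noabort
  have h_DGifDecreaseImageCounter_E := Gif.Spec.Proved.DGifDecreaseImageCounter_E_ok Lay hLay μ hμ u₀ hcode.DGifDecreaseImageCounter
  have h_DGifGetCodeNext_E := Gif.Spec.Proved.DGifGetCodeNext_E_ok Lay hLay μ hμ u₀ hcode.DGifGetCodeNext
  have h_DGifGetCodeNext_P := Gif.Spec.Proved.DGifGetCodeNext_P_ok Lay hLay μ hμ u₀ hcode.DGifGetCodeNext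
  have h_DGifGetExtensionNext_E := Gif.Spec.Proved.DGifGetExtensionNext_E_ok Lay hLay μ hμ u₀ hcode.DGifGetExtensionNext
  have h_DGifGetExtensionNext_P := Gif.Spec.Proved.DGifGetExtensionNext_P_ok Lay hLay μ hμ u₀ hcode.DGifGetExtensionNext
  have h_DGifGetExtension_E := Gif.Spec.Proved.DGifGetExtension_E_ok Lay hLay μ hμ u₀ hcode.DGifGetExtension
  have h_DGifGetExtension_P := Gif.Spec.Proved.DGifGetExtension_P_ok Lay hLay μ hμ u₀ hcode.DGifGetExtension
  have h_DGifGetImageDesc_3 := Gif.Spec.Proved.DGifGetImageDesc_3_ok Lay hLay μ hμ u₀ hcode.DGifGetImageDesc hgiven.malloc hgiven.asan_store8_noabort hgiven.asan_store4_noabort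
  have h_DGifGetImageDesc_4 := Gif.Spec.Proved.DGifGetImageDesc_4_ok Lay hLay μ hμ u₀ hcode.DGifGetImageDesc hgiven.memcpy hgiven.asan_load4_noabort
  have h_DGifGetImageDesc_6 := Gif.Spec.Proved.DGifGetImageDesc_6_ok Lay hLay μ hμ u₀ hcode.DGifGetImageDesc hgiven.asan_store8_noabort hgiven.asan_store4_noabort hgiven.asan_load4_noabort
  have h_DGifGetImageDesc_E := Gif.Spec.Proved.DGifGetImageDesc_E_ok Lay hLay μ hμ u₀ hcode.DGifGetImageDesc
  have h_DGifGetImageHeader_5 := Gif.Spec.Proved.DGifGetImageHeader_5_ok Lay hLay μ hμ u₀ hcode.DGifGetImageHeader hgiven.asan_load8_noabort hgiven.asan_store1_noabort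
  have h_DGifGetImageHeader_E := Gif.Spec.Proved.DGifGetImageHeader_E_ok Lay hLay μ hμ u₀ hcode.DGifGetImageHeader
  have h_DGifGetImageHeader_P := Gif.Spec.Proved.DGifGetImageHeader_P_ok Lay hLay μ hμ u₀ hcode.DGifGetImageHeader
  have h_DGifGetLine_1 := Gif.Spec.Proved.DGifGetLine_1_ok Lay hLay μ hμ u₀ hcode.DGifGetLine hgiven.asan_load8_noabort hgiven.asan_load4_noabort hgiven.asan_store4_noabort
  have h_DGifGetLine_E := Gif.Spec.Proved.DGifGetLine_E_ok Lay hLay μ hμ u₀ hcode.DGifGetLine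
  have h_DGifGetLine_P := Gif.Spec.Proved.DGifGetLine_P_ok Lay hLay μ hμ u₀ hcode.DGifGetLine
  have h_DGifGetPrefixChar := Gif.Spec.Proved.DGifGetPrefixChar_ok Lay hLay μ hμ u₀ hcode.DGifGetPrefixChar hgiven.asan_load4_noabort
  have h_DGifGetRecordType_2 := Gif.Spec.Proved.DGifGetRecordType_2_ok Lay hLay μ hμ u₀ hcode.DGifGetRecordType hgiven.asan_store4_noabort
  have h_DGifGetRecordType_E := Gif.Spec.Proved.DGifGetRecordType_E_ok Lay hLay μ hμ u₀ hcode.DGifGetRecordType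
  have h_DGifGetRecordType_P := Gif.Spec.Proved.DGifGetRecordType_P_ok Lay hLay μ hμ u₀ hcode.DGifGetRecordType
  have h_DGifGetScreenDesc_3 := Gif.Spec.Proved.DGifGetScreenDesc_3_ok Lay hLay μ hμ u₀ hcode.DGifGetScreenDesc hgiven.asan_store4_noabort hgiven.asan_store1_noabort hgiven.asan_store8_noabort
  have h_DGifGetScreenDesc_6 := Gif.Spec.Proved.DGifGetScreenDesc_6_ok Lay hLay μ hμ u₀ hcode.DGifGetScreenDesc hgiven.asan_load8_noabort hgiven.asan_store1_noabort
  have h_DGifGetScreenDesc_E := Gif.Spec.Proved.DGifGetScreenDesc_E_ok Lay hLay μ hμ u₀ hcode.DGifGetScreenDesc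
  have h_DGifGetScreenDesc_P := Gif.Spec.Proved.DGifGetScreenDesc_P_ok Lay hLay μ hμ u₀ hcode.DGifGetScreenDesc
  have h_DGifGetWord_E := Gif.Spec.Proved.DGifGetWord_E_ok Lay hLay μ hμ u₀ hcode.DGifGetWord
  have h_DGifGetWord_P := Gif.Spec.Proved.DGifGetWord_P_ok Lay hLay μ hμ u₀ hcode.DGifGetWord
  have h_DGifOpen_1 := Gif.Spec.Proved.DGifOpen_1_ok Lay hLay μ hμ u₀ hcode.DGifOpen hgiven.malloc hgiven.memset hgiven.asan_store8_noabort hgiven.asan_store4_noabort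
  have h_DGifOpen_2 := Gif.Spec.Proved.DGifOpen_2_ok Lay hLay μ hμ u₀ hcode.DGifOpen hgiven.calloc hgiven.memset hgiven.free hgiven.asan_store8_noabort hgiven.asan_store4_noabort
  have h_DGifOpen_E := Gif.Spec.Proved.DGifOpen_E_ok Lay hLay μ hμ u₀ hcode.DGifOpen
  have h_DGifOpen_P := Gif.Spec.Proved.DGifOpen_P_ok Lay hLay μ hμ u₀ hcode.DGifOpen
  have h_DGifSetupDecompress_2 := Gif.Spec.Proved.DGifSetupDecompress_2_ok Lay hLay μ hμ u₀ hcode.DGifSetupDecompress hgiven.asan_store1_noabort hgiven.asan_store4_noabort hgiven.asan_store8_noabort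
  have h_DGifSetupDecompress_3 := Gif.Spec.Proved.DGifSetupDecompress_3_ok Lay hLay μ hμ u₀ hcode.DGifSetupDecompress hgiven.asan_store4_noabort
  have h_DGifSetupDecompress_E := Gif.Spec.Proved.DGifSetupDecompress_E_ok Lay hLay μ hμ u₀ hcode.DGifSetupDecompress
  have h_DGifSetupDecompress_P := Gif.Spec.Proved.DGifSetupDecompress_P_ok Lay hLay μ hμ u₀ hcode.DGifSetupDecompress
  have h_DGifSlurp_1 := Gif.Spec.Proved.DGifSlurp_1_ok Lay hLay μ hμ u₀ hcode.DGifSlurp hgiven.asan_store8_noabort hgiven.asan_store4_noabort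
  have h_DGifSlurp_12 := Gif.Spec.Proved.DGifSlurp_12_ok Lay hLay μ hμ u₀ hcode.DGifSlurp hgiven.asan_load4_noabort hgiven.asan_store4_noabort
  have h_DGifSlurp_7 := Gif.Spec.Proved.DGifSlurp_7_ok Lay hLay μ hμ u₀ hcode.DGifSlurp hgiven.asan_load4_noabort
  have h_DGifSlurp_9 := Gif.Spec.Proved.DGifSlurp_9_ok Lay hLay μ hμ u₀ hcode.DGifSlurp hgiven.asan_load8_noabort hgiven.asan_store8_noabort hgiven.asan_load4_noabort hgiven.asan_store4_noabort
  have h_DGifSlurp_E := Gif.Spec.Proved.DGifSlurp_E_ok Lay hLay μ hμ u₀ hcode.DGifSlurp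
  have h_DGifSlurp_P := Gif.Spec.Proved.DGifSlurp_P_ok Lay hLay μ hμ u₀ hcode.DGifSlurp
  have h_GifAddExtensionBlock_2 := Gif.Spec.Proved.GifAddExtensionBlock_2_ok Lay hLay μ hμ u₀ hcode.GifAddExtensionBlock hgiven.malloc hgiven.asan_load8_noabort hgiven.asan_load4_noabort hgiven.asan_store4_noabort hgiven.asan_store8_noabort
  have h_GifAddExtensionBlock_3 := Gif.Spec.Proved.GifAddExtensionBlock_3_ok Lay hLay μ hμ u₀ hcode.GifAddExtensionBlock hgiven.memcpy
  have h_GifAddExtensionBlock_E := Gif.Spec.Proved.GifAddExtensionBlock_E_ok Lay hLay μ hμ u₀ hcode.GifAddExtensionBlock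
  have h_GifBitSize := Gif.Spec.Proved.GifBitSize_ok Lay hLay μ hμ u₀ hcode.GifBitSize
  have h_GifFreeExtensions_1 := Gif.Spec.Proved.GifFreeExtensions_1_ok Lay hLay μ hμ u₀ hcode.GifFreeExtensions hgiven.asan_load8_noabort
  have h_GifFreeExtensions_2 := Gif.Spec.Proved.GifFreeExtensions_2_ok Lay hLay μ hμ u₀ hcode.GifFreeExtensions hgiven.free hgiven.asan_load8_noabort hgiven.asan_load4_noabort hgiven.asan_store8_noabort hgiven.asan_store4_noabort
  have h_GifFreeExtensions_COMPOSITION := Gif.Spec.Proved.GifFreeExtensions_COMPOSITION_ok Lay hLay μ hμ u₀ h_GifFreeExtensions_1 h_GifFreeExtensions_2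
  have h_GifFreeMapObject := Gif.Spec.Proved.GifFreeMapObject_ok Lay hLay μ hμ u₀ hcode.GifFreeMapObject hgiven.free hgiven.asan_load8_noabort
  have h_GifFreeSavedImages_1 := Gif.Spec.Proved.GifFreeSavedImages_1_ok Lay hLay μ hμ u₀ hcode.GifFreeSavedImages hgiven.asan_load8_noabort
  have h_GifFreeSavedImages_2 := Gif.Spec.Proved.GifFreeSavedImages_2_ok Lay hLay μ hμ u₀ hcode.GifFreeSavedImages h_GifFreeMapObject hgiven.free h_GifFreeExtensions_COMPOSITION hgiven.asan_load8_noabort hgiven.asan_load4_noabort hgiven.asan_store8_noabort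
  have h_GifFreeSavedImages_3 := Gif.Spec.Proved.GifFreeSavedImages_3_ok Lay hLay μ hμ u₀ hcode.GifFreeSavedImages hgiven.free hgiven.asan_store8_noabort
  have h_GifFreeSavedImages_COMPOSITION := Gif.Spec.Proved.GifFreeSavedImages_COMPOSITION_ok Lay hLay μ hμ u₀ h_GifFreeSavedImages_1 h_GifFreeSavedImages_2 h_GifFreeSavedImages_3
  have h_GifMakeMapObject_1 := Gif.Spec.Proved.GifMakeMapObject_1_ok Lay hLay μ hμ u₀ hcode.GifMakeMapObject h_GifBitSize hgiven.malloc
  have h_GifMakeMapObject_2 := Gif.Spec.Proved.GifMakeMapObject_2_ok Lay hLay μ hμ u₀ hcode.GifMakeMapObject hgiven.calloc hgiven.memcpy hgiven.free hgiven.asan_store8_noabort hgiven.asan_store4_noabort hgiven.asan_store1_noabort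
  have h_GifMakeMapObject_E := Gif.Spec.Proved.GifMakeMapObject_E_ok Lay hLay μ hμ u₀ hcode.GifMakeMapObject
  have h_digest_byte := Gif.Spec.Proved.digest_byte_ok Lay hLay μ hμ u₀ hcode.digest_byte
  have h_digest_bytes := Gif.Spec.Proved.digest_bytes_ok Lay hLay μ hμ u₀ hcode.digest_bytes h_digest_byte hgiven.asan_load1_noabort
  have h_digest_extensions_E := Gif.Spec.Proved.digest_extensions_E_ok Lay hLay μ hμ u₀ hcode.digest_extensions
  have h_digest_int := Gif.Spec.Proved.digest_int_ok Lay hLay μ hμ u₀ hcode.digest_int h_digest_byte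
  have h_digest_map_1 := Gif.Spec.Proved.digest_map_1_ok Lay hLay μ hμ u₀ hcode.digest_map h_digest_int hgiven.asan_load4_noabort hgiven.asan_load1_noabort
  have h_digest_map_2 := Gif.Spec.Proved.digest_map_2_ok Lay hLay μ hμ u₀ hcode.digest_map h_digest_byte hgiven.asan_load8_noabort hgiven.asan_load1_noabort
  have h_digest_map_E := Gif.Spec.Proved.digest_map_E_ok Lay hLay μ hμ u₀ hcode.digest_map
  have h_gif_decode_1 := Gif.Spec.Proved.gif_decode_1_ok Lay hLay μ hμ u₀ hcode.gif_decode hgiven.asan_store4_noabort hgiven.asan_store8_noabort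
  have h_gif_decode_E := Gif.Spec.Proved.gif_decode_E_ok Lay hLay μ hμ u₀ hcode.gif_decode
  have h_gif_decode_P := Gif.Spec.Proved.gif_decode_P_ok Lay hLay μ hμ u₀ hcode.gif_decode
  have h_mem_read := Gif.Spec.Proved.mem_read_ok Lay hLay μ hμ u₀ hcode.mem_read hgiven.memcpy hgiven.asan_load8_noabort
  have h_openbsd_reallocarray := Gif.Spec.Proved.openbsd_reallocarray_ok Lay hLay μ hμ u₀ hcode.openbsd_reallocarray hgiven.realloc
  have h_prog_main_E := Gif.Spec.Proved.prog_main_E_ok Lay hLay μ hμ u₀ hcode.prog_main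
  have h_prog_main_P := Gif.Spec.Proved.prog_main_P_ok Lay hLay μ hμ u₀ hcode.prog_main
  have h_strncmp := Gif.Spec.Proved.strncmp_ok Lay hLay μ hμ u₀ hcode.strncmp hgiven.asan_load1_noabort
  have h_sub_I_65535_1 := Gif.Spec.Proved.sub_I_65535_1_ok Lay hLay μ hμ u₀ hcode.sub_I_65535_1 h_asan_register_globals
  have h_DGifCloseFile_1 := Gif.Spec.Proved.DGifCloseFile_1_ok Lay hLay μ hμ u₀ hcode.DGifCloseFile hgiven.asan_load8_noabort h_GifFreeMapObject hgiven.asan_store8_noabort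
  have h_DGifCloseFile_2 := Gif.Spec.Proved.DGifCloseFile_2_ok Lay hLay μ hμ u₀ hcode.DGifCloseFile hgiven.asan_load8_noabort h_GifFreeMapObject hgiven.asan_store8_noabort
  have h_DGifCloseFile_3 := Gif.Spec.Proved.DGifCloseFile_3_ok Lay hLay μ hμ u₀ hcode.DGifCloseFile hgiven.asan_load8_noabort h_GifFreeSavedImages_COMPOSITION hgiven.asan_store8_noabort
  have h_DGifCloseFile_4 := Gif.Spec.Proved.DGifCloseFile_4_ok Lay hLay μ hμ u₀ hcode.DGifCloseFile h_GifFreeExtensions_COMPOSITION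
  have h_DGifCloseFile_COMPOSITION := Gif.Spec.Proved.DGifCloseFile_COMPOSITION_ok Lay hLay μ hμ u₀ h_DGifCloseFile_1 h_DGifCloseFile_2 h_DGifCloseFile_3 h_DGifCloseFile_4 h_DGifCloseFile_5
  have h_DGifDecompressLine_14 := Gif.Spec.Proved.DGifDecompressLine_14_ok Lay hLay μ hμ u₀ hcode.DGifDecompressLine h_DGifGetPrefixChar hgiven.asan_store1_noabort
  have h_DGifDecompressLine_15 := Gif.Spec.Proved.DGifDecompressLine_15_ok Lay hLay μ hμ u₀ hcode.DGifDecompressLine h_DGifGetPrefixChar hgiven.asan_store1_noabort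
  have h_DGifDecompressLine_8 := Gif.Spec.Proved.DGifDecompressLine_8_ok Lay hLay μ hμ u₀ hcode.DGifDecompressLine h_DGifGetPrefixChar hgiven.asan_store1_noabort
  have h_DGifDecompressLine_9 := Gif.Spec.Proved.DGifDecompressLine_9_ok Lay hLay μ hμ u₀ hcode.DGifDecompressLine h_DGifGetPrefixChar hgiven.asan_store1_noabort
  have h_DGifDecreaseImageCounter_2 := Gif.Spec.Proved.DGifDecreaseImageCounter_2_ok Lay hLay μ hμ u₀ hcode.DGifDecreaseImageCounter h_GifFreeMapObject hgiven.asan_load8_noabort hgiven.asan_load4_noabort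
  have h_DGifDecreaseImageCounter_3 := Gif.Spec.Proved.DGifDecreaseImageCounter_3_ok Lay hLay μ hμ u₀ hcode.DGifDecreaseImageCounter h_openbsd_reallocarray hgiven.free hgiven.asan_load4_noabort hgiven.asan_load8_noabort hgiven.asan_store8_noabort hgiven.asan_store4_noabort
  have h_DGifDecreaseImageCounter_COMPOSITION := Gif.Spec.Proved.DGifDecreaseImageCounter_COMPOSITION_ok Lay hLay μ hμ u₀ h_DGifDecreaseImageCounter_1 h_DGifDecreaseImageCounter_2 h_DGifDecreaseImageCounter_3 h_DGifDecreaseImageCounter_E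
  have h_DGifGetImageDesc_2 := Gif.Spec.Proved.DGifGetImageDesc_2_ok Lay hLay μ hμ u₀ hcode.DGifGetImageDesc h_openbsd_reallocarray hgiven.asan_load8_noabort hgiven.asan_load4_noabort hgiven.asan_store8_noabort hgiven.asan_store4_noabort
  have h_DGifOpen_4 := Gif.Spec.Proved.DGifOpen_4_ok Lay hLay μ hμ u₀ hcode.DGifOpen h_strncmp hgiven.free hgiven.asan_store4_noabort
  have h_DGifSlurp_4 := Gif.Spec.Proved.DGifSlurp_4_ok Lay hLay μ hμ u₀ hcode.DGifSlurp hgiven.asan_load8_noabort hgiven.asan_load4_noabort h_DGifDecreaseImageCounter_COMPOSITION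
  have h_DGifSlurp_5 := Gif.Spec.Proved.DGifSlurp_5_ok Lay hLay μ hμ u₀ hcode.DGifSlurp h_openbsd_reallocarray hgiven.asan_store8_noabort hgiven.asan_load1_noabort h_DGifDecreaseImageCounter_COMPOSITION
  have h_GifAddExtensionBlock_1 := Gif.Spec.Proved.GifAddExtensionBlock_1_ok Lay hLay μ hμ u₀ hcode.GifAddExtensionBlock h_openbsd_reallocarray hgiven.malloc hgiven.asan_load8_noabort hgiven.asan_load4_noabort hgiven.asan_store8_noabort
  have h_GifAddExtensionBlock_COMPOSITION := Gif.Spec.Proved.GifAddExtensionBlock_COMPOSITION_ok Lay hLay μ hμ u₀ h_GifAddExtensionBlock_1 h_GifAddExtensionBlock_2 h_GifAddExtensionBlock_3 h_GifAddExtensionBlock_E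
  have h_GifMakeMapObject_COMPOSITION := Gif.Spec.Proved.GifMakeMapObject_COMPOSITION_ok Lay hLay μ hμ u₀ h_GifMakeMapObject_1 h_GifMakeMapObject_2 h_GifMakeMapObject_E
  have h_InternalRead := Gif.Spec.Proved.InternalRead_ok Lay hLay μ hμ u₀ hcode.InternalRead hgiven.asan_load8_noabort h_mem_read
  have h_digest_extensions_1 := Gif.Spec.Proved.digest_extensions_1_ok Lay hLay μ hμ u₀ hcode.digest_extensions h_digest_int
  have h_digest_extensions_2 := Gif.Spec.Proved.digest_extensions_2_ok Lay hLay μ hμ u₀ hcode.digest_extensions h_digest_int h_digest_bytes hgiven.asan_load4_noabort hgiven.asan_load8_noabort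
  have h_digest_extensions_COMPOSITION := Gif.Spec.Proved.digest_extensions_COMPOSITION_ok Lay hLay μ hμ u₀ h_digest_extensions_1 h_digest_extensions_2 h_digest_extensions_E
  have h_digest_file_1 := Gif.Spec.Proved.digest_file_1_ok Lay hLay μ hμ u₀ hcode.digest_file h_digest_int hgiven.asan_load4_noabort
  have h_digest_file_2 := Gif.Spec.Proved.digest_file_2_ok Lay hLay μ hμ u₀ hcode.digest_file h_digest_int hgiven.asan_load4_noabort hgiven.asan_load1_noabort
  have h_digest_file_4 := Gif.Spec.Proved.digest_file_4_ok Lay hLay μ hμ u₀ hcode.digest_file h_digest_int hgiven.asan_load8_noabort hgiven.asan_load4_noabort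
  have h_digest_file_5 := Gif.Spec.Proved.digest_file_5_ok Lay hLay μ hμ u₀ hcode.digest_file h_digest_int hgiven.asan_load1_noabort
  have h_digest_file_7 := Gif.Spec.Proved.digest_file_7_ok Lay hLay μ hμ u₀ hcode.digest_file h_digest_extensions_COMPOSITION hgiven.asan_load8_noabort hgiven.asan_load4_noabort hgiven.asan_store8_noabort
  have h_digest_map_COMPOSITION := Gif.Spec.Proved.digest_map_COMPOSITION_ok Lay hLay μ hμ u₀ h_digest_map_1 h_digest_map_2 h_digest_map_E
  have h_gif_decode_5 := Gif.Spec.Proved.gif_decode_5_ok Lay hLay μ hμ u₀ hcode.gif_decode h_DGifCloseFile_COMPOSITION hgiven.asan_store4_noabort hgiven.asan_store8_noabort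
  have h_run_ctors := Gif.Spec.Proved.run_ctors_ok Lay hLay μ hμ u₀ hcode.run_ctors h_sub_I_65535_1
  have h_DGifBufferedInput_2 := Gif.Spec.Proved.DGifBufferedInput_2_ok Lay hLay μ hμ u₀ hcode.DGifBufferedInput h_InternalRead hgiven.asan_load1_noabort hgiven.asan_store4_noabort
  have h_DGifBufferedInput_3 := Gif.Spec.Proved.DGifBufferedInput_3_ok Lay hLay μ hμ u₀ hcode.DGifBufferedInput h_InternalRead hgiven.asan_load1_noabort hgiven.asan_store1_noabort hgiven.asan_store4_noabort
  have h_DGifBufferedInput_COMPOSITION := Gif.Spec.Proved.DGifBufferedInput_COMPOSITION_ok Lay hLay μ hμ u₀ h_DGifBufferedInput_1 h_DGifBufferedInput_2 h_DGifBufferedInput_3 h_DGifBufferedInput_E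
  have h_DGifDecompressInput_2 := Gif.Spec.Proved.DGifDecompressInput_2_ok Lay hLay μ hμ u₀ hcode.DGifDecompressInput h_DGifBufferedInput_COMPOSITION hgiven.asan_load4_noabort hgiven.asan_load8_noabort
  have h_DGifDecompressInput_COMPOSITION := Gif.Spec.Proved.DGifDecompressInput_COMPOSITION_ok Lay hLay μ hμ u₀ h_DGifDecompressInput_P h_DGifDecompressInput_1 h_DGifDecompressInput_2 h_DGifDecompressInput_3 h_DGifDecompressInput_E
  have h_DGifDecompressLine_3 := Gif.Spec.Proved.DGifDecompressLine_3_ok Lay hLay μ hμ u₀ hcode.DGifDecompressLine h_DGifDecompressInput_COMPOSITION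
  have h_DGifDecompressLine_COMPOSITION := Gif.Spec.Proved.DGifDecompressLine_COMPOSITION_ok Lay hLay μ hμ u₀ h_DGifDecompressLine_P h_DGifDecompressLine_1 h_DGifDecompressLine_2 h_DGifDecompressLine_3 h_DGifDecompressLine_4 h_DGifDecompressLine_5 h_DGifDecompressLine_6 h_DGifDecompressLine_7 h_DGifDecompressLine_8 h_DGifDecompressLine_9 h_DGifDecompressLine_10 h_DGifDecompressLine_11 h_DGifDecompressLine_12 h_DGifDecompressLine_13 h_DGifDecompressLine_14 h_DGifDecompressLine_15 h_DGifDecompressLine_E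
  have h_DGifGetCodeNext_1 := Gif.Spec.Proved.DGifGetCodeNext_1_ok Lay hLay μ hμ u₀ hcode.DGifGetCodeNext h_InternalRead hgiven.asan_load8_noabort hgiven.asan_store4_noabort
  have h_DGifGetCodeNext_2 := Gif.Spec.Proved.DGifGetCodeNext_2_ok Lay hLay μ hμ u₀ hcode.DGifGetCodeNext h_InternalRead hgiven.asan_store8_noabort hgiven.asan_store1_noabort hgiven.asan_store4_noabort
  have h_DGifGetCodeNext_COMPOSITION := Gif.Spec.Proved.DGifGetCodeNext_COMPOSITION_ok Lay hLay μ hμ u₀ h_DGifGetCodeNext_P h_DGifGetCodeNext_1 h_DGifGetCodeNext_2 h_DGifGetCodeNext_E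
  have h_DGifGetExtensionNext_1 := Gif.Spec.Proved.DGifGetExtensionNext_1_ok Lay hLay μ hμ u₀ hcode.DGifGetExtensionNext h_InternalRead hgiven.asan_load8_noabort hgiven.asan_store4_noabort
  have h_DGifGetExtensionNext_2 := Gif.Spec.Proved.DGifGetExtensionNext_2_ok Lay hLay μ hμ u₀ hcode.DGifGetExtensionNext h_InternalRead hgiven.asan_store8_noabort hgiven.asan_store1_noabort hgiven.asan_store4_noabort
  have h_DGifGetExtensionNext_COMPOSITION := Gif.Spec.Proved.DGifGetExtensionNext_COMPOSITION_ok Lay hLay μ hμ u₀ h_DGifGetExtensionNext_P h_DGifGetExtensionNext_1 h_DGifGetExtensionNext_2 h_DGifGetExtensionNext_E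
  have h_DGifGetExtension_1 := Gif.Spec.Proved.DGifGetExtension_1_ok Lay hLay μ hμ u₀ hcode.DGifGetExtension h_InternalRead hgiven.asan_load8_noabort hgiven.asan_load4_noabort hgiven.asan_store4_noabort
  have h_DGifGetExtension_2 := Gif.Spec.Proved.DGifGetExtension_2_ok Lay hLay μ hμ u₀ hcode.DGifGetExtension h_DGifGetExtensionNext_COMPOSITION hgiven.asan_store4_noabort
  have h_DGifGetExtension_COMPOSITION := Gif.Spec.Proved.DGifGetExtension_COMPOSITION_ok Lay hLay μ hμ u₀ h_DGifGetExtension_P h_DGifGetExtension_1 h_DGifGetExtension_2 h_DGifGetExtension_E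
  have h_DGifGetImageDesc_5 := Gif.Spec.Proved.DGifGetImageDesc_5_ok Lay hLay μ hμ u₀ hcode.DGifGetImageDesc h_GifMakeMapObject_COMPOSITION hgiven.asan_load8_noabort hgiven.asan_load4_noabort hgiven.asan_store8_noabort hgiven.asan_store4_noabort
  have h_DGifGetImageHeader_3 := Gif.Spec.Proved.DGifGetImageHeader_3_ok Lay hLay μ hμ u₀ hcode.DGifGetImageHeader h_GifFreeMapObject h_GifMakeMapObject_COMPOSITION hgiven.asan_store1_noabort hgiven.asan_load8_noabort hgiven.asan_store8_noabort hgiven.asan_store4_noabort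
  have h_DGifGetImageHeader_4 := Gif.Spec.Proved.DGifGetImageHeader_4_ok Lay hLay μ hμ u₀ hcode.DGifGetImageHeader h_InternalRead h_GifFreeMapObject hgiven.asan_load4_noabort hgiven.asan_load8_noabort hgiven.asan_store4_noabort hgiven.asan_store8_noabort
  have h_DGifGetLine_2 := Gif.Spec.Proved.DGifGetLine_2_ok Lay hLay μ hμ u₀ hcode.DGifGetLine h_DGifDecompressLine_COMPOSITION hgiven.asan_load8_noabort
  have h_DGifGetLine_3 := Gif.Spec.Proved.DGifGetLine_3_ok Lay hLay μ hμ u₀ hcode.DGifGetLine h_DGifGetCodeNext_COMPOSITION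
  have h_DGifGetLine_COMPOSITION := Gif.Spec.Proved.DGifGetLine_COMPOSITION_ok Lay hLay μ hμ u₀ h_DGifGetLine_P h_DGifGetLine_1 h_DGifGetLine_2 h_DGifGetLine_3 h_DGifGetLine_E
  have h_DGifGetRecordType_1 := Gif.Spec.Proved.DGifGetRecordType_1_ok Lay hLay μ hμ u₀ hcode.DGifGetRecordType h_InternalRead hgiven.asan_load8_noabort hgiven.asan_load4_noabort hgiven.asan_store4_noabort
  have h_DGifGetRecordType_COMPOSITION := Gif.Spec.Proved.DGifGetRecordType_COMPOSITION_ok Lay hLay μ hμ u₀ h_DGifGetRecordType_P h_DGifGetRecordType_1 h_DGifGetRecordType_2 h_DGifGetRecordType_E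
  have h_DGifGetScreenDesc_2 := Gif.Spec.Proved.DGifGetScreenDesc_2_ok Lay hLay μ hμ u₀ hcode.DGifGetScreenDesc h_InternalRead h_GifFreeMapObject hgiven.asan_store4_noabort hgiven.asan_load8_noabort hgiven.asan_store8_noabort
  have h_DGifGetScreenDesc_4 := Gif.Spec.Proved.DGifGetScreenDesc_4_ok Lay hLay μ hμ u₀ hcode.DGifGetScreenDesc h_GifMakeMapObject_COMPOSITION hgiven.asan_store8_noabort hgiven.asan_store1_noabort hgiven.asan_store4_noabort
  have h_DGifGetScreenDesc_5 := Gif.Spec.Proved.DGifGetScreenDesc_5_ok Lay hLay μ hμ u₀ hcode.DGifGetScreenDesc h_InternalRead h_GifFreeMapObject hgiven.asan_load4_noabort hgiven.asan_load8_noabort hgiven.asan_store8_noabort hgiven.asan_store4_noabort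
  have h_DGifGetWord_1 := Gif.Spec.Proved.DGifGetWord_1_ok Lay hLay μ hμ u₀ hcode.DGifGetWord h_InternalRead hgiven.asan_store4_noabort
  have h_DGifGetWord_COMPOSITION := Gif.Spec.Proved.DGifGetWord_COMPOSITION_ok Lay hLay μ hμ u₀ h_DGifGetWord_P h_DGifGetWord_1 h_DGifGetWord_E
  have h_DGifOpen_3 := Gif.Spec.Proved.DGifOpen_3_ok Lay hLay μ hμ u₀ hcode.DGifOpen h_InternalRead hgiven.free hgiven.asan_store4_noabort
  have h_DGifSetupDecompress_1 := Gif.Spec.Proved.DGifSetupDecompress_1_ok Lay hLay μ hμ u₀ hcode.DGifSetupDecompress h_InternalRead hgiven.asan_load8_noabort hgiven.asan_store4_noabort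
  have h_DGifSetupDecompress_COMPOSITION := Gif.Spec.Proved.DGifSetupDecompress_COMPOSITION_ok Lay hLay μ hμ u₀ h_DGifSetupDecompress_P h_DGifSetupDecompress_1 h_DGifSetupDecompress_2 h_DGifSetupDecompress_3 h_DGifSetupDecompress_E
  have h_DGifSlurp_10 := Gif.Spec.Proved.DGifSlurp_10_ok Lay hLay μ hμ u₀ hcode.DGifSlurp h_DGifGetExtension_COMPOSITION hgiven.asan_load1_noabort h_GifAddExtensionBlock_COMPOSITION
  have h_DGifSlurp_11 := Gif.Spec.Proved.DGifSlurp_11_ok Lay hLay μ hμ u₀ hcode.DGifSlurp h_DGifGetExtensionNext_COMPOSITION hgiven.asan_load1_noabort h_GifAddExtensionBlock_COMPOSITION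
  have h_DGifSlurp_2 := Gif.Spec.Proved.DGifSlurp_2_ok Lay hLay μ hμ u₀ hcode.DGifSlurp h_DGifGetRecordType_COMPOSITION
  have h_DGifSlurp_6 := Gif.Spec.Proved.DGifSlurp_6_ok Lay hLay μ hμ u₀ hcode.DGifSlurp h_DGifGetLine_COMPOSITION h_DGifDecreaseImageCounter_COMPOSITION
  have h_DGifSlurp_8 := Gif.Spec.Proved.DGifSlurp_8_ok Lay hLay μ hμ u₀ hcode.DGifSlurp hgiven.asan_load4_noabort h_DGifGetLine_COMPOSITION h_DGifDecreaseImageCounter_COMPOSITION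
  have h_digest_file_3 := Gif.Spec.Proved.digest_file_3_ok Lay hLay μ hμ u₀ hcode.digest_file h_digest_map_COMPOSITION h_digest_int hgiven.asan_load8_noabort hgiven.asan_load4_noabort
  have h_digest_file_6 := Gif.Spec.Proved.digest_file_6_ok Lay hLay μ hμ u₀ hcode.digest_file h_digest_map_COMPOSITION h_digest_bytes h_digest_extensions_COMPOSITION hgiven.asan_load8_noabort hgiven.asan_load4_noabort
  have h_digest_file_COMPOSITION := Gif.Spec.Proved.digest_file_COMPOSITION_ok Lay hLay μ hμ u₀ h_digest_file_1 h_digest_file_2 h_digest_file_3 h_digest_file_4 h_digest_file_5 h_digest_file_6 h_digest_file_7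
  have h_gif_decode_4 := Gif.Spec.Proved.gif_decode_4_ok Lay hLay μ hμ u₀ hcode.gif_decode h_digest_file_COMPOSITION hgiven.asan_store8_noabort
  have h_DGifGetImageHeader_1 := Gif.Spec.Proved.DGifGetImageHeader_1_ok Lay hLay μ hμ u₀ hcode.DGifGetImageHeader h_DGifGetWord_COMPOSITION hgiven.asan_load8_noabort hgiven.asan_load4_noabort hgiven.asan_store4_noabort
  have h_DGifGetImageHeader_2 := Gif.Spec.Proved.DGifGetImageHeader_2_ok Lay hLay μ hμ u₀ hcode.DGifGetImageHeader h_DGifGetWord_COMPOSITION h_InternalRead h_GifFreeMapObject hgiven.asan_store4_noabort hgiven.asan_load8_noabort hgiven.asan_store8_noabort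
  have h_DGifGetImageHeader_6 := Gif.Spec.Proved.DGifGetImageHeader_6_ok Lay hLay μ hμ u₀ hcode.DGifGetImageHeader h_DGifSetupDecompress_COMPOSITION hgiven.asan_load4_noabort hgiven.asan_store8_noabort
  have h_DGifGetImageHeader_COMPOSITION := Gif.Spec.Proved.DGifGetImageHeader_COMPOSITION_ok Lay hLay μ hμ u₀ h_DGifGetImageHeader_P h_DGifGetImageHeader_1 h_DGifGetImageHeader_2 h_DGifGetImageHeader_3 h_DGifGetImageHeader_4 h_DGifGetImageHeader_5 h_DGifGetImageHeader_6 h_DGifGetImageHeader_E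
  have h_DGifGetScreenDesc_1 := Gif.Spec.Proved.DGifGetScreenDesc_1_ok Lay hLay μ hμ u₀ hcode.DGifGetScreenDesc h_DGifGetWord_COMPOSITION hgiven.asan_load8_noabort hgiven.asan_load4_noabort
  have h_DGifGetScreenDesc_COMPOSITION := Gif.Spec.Proved.DGifGetScreenDesc_COMPOSITION_ok Lay hLay μ hμ u₀ h_DGifGetScreenDesc_P h_DGifGetScreenDesc_1 h_DGifGetScreenDesc_2 h_DGifGetScreenDesc_3 h_DGifGetScreenDesc_4 h_DGifGetScreenDesc_5 h_DGifGetScreenDesc_6 h_DGifGetScreenDesc_E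
  have h_DGifOpen_5 := Gif.Spec.Proved.DGifOpen_5_ok Lay hLay μ hμ u₀ hcode.DGifOpen h_DGifGetScreenDesc_COMPOSITION hgiven.free hgiven.asan_store4_noabort hgiven.asan_store1_noabort
  have h_DGifOpen_COMPOSITION := Gif.Spec.Proved.DGifOpen_COMPOSITION_ok Lay hLay μ hμ u₀ h_DGifOpen_P h_DGifOpen_1 h_DGifOpen_2 h_DGifOpen_3 h_DGifOpen_4 h_DGifOpen_5 h_DGifOpen_E
  have h_gif_decode_2 := Gif.Spec.Proved.gif_decode_2_ok Lay hLay μ hμ u₀ hcode.gif_decode h_DGifOpen_COMPOSITION hgiven.asan_store4_noabort hgiven.asan_store8_noabort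
  have h_DGifGetImageDesc_1 := Gif.Spec.Proved.DGifGetImageDesc_1_ok Lay hLay μ hμ u₀ hcode.DGifGetImageDesc h_DGifGetImageHeader_COMPOSITION hgiven.asan_load8_noabort hgiven.asan_load4_noabort hgiven.asan_store4_noabort
  have h_DGifGetImageDesc_COMPOSITION := Gif.Spec.Proved.DGifGetImageDesc_COMPOSITION_ok Lay hLay μ hμ u₀ h_DGifGetImageDesc_1 h_DGifGetImageDesc_2 h_DGifGetImageDesc_3 h_DGifGetImageDesc_4 h_DGifGetImageDesc_5 h_DGifGetImageDesc_6 h_DGifGetImageDesc_E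
  have h_DGifSlurp_3 := Gif.Spec.Proved.DGifSlurp_3_ok Lay hLay μ hμ u₀ hcode.DGifSlurp h_DGifGetImageDesc_COMPOSITION
  have h_DGifSlurp_COMPOSITION := Gif.Spec.Proved.DGifSlurp_COMPOSITION_ok Lay hLay μ hμ u₀ h_DGifSlurp_P h_DGifSlurp_1 h_DGifSlurp_2 h_DGifSlurp_3 h_DGifSlurp_4 h_DGifSlurp_5 h_DGifSlurp_6 h_DGifSlurp_7 h_DGifSlurp_8 h_DGifSlurp_9 h_DGifSlurp_10 h_DGifSlurp_11 h_DGifSlurp_12 h_DGifSlurp_E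
  have h_gif_decode_3 := Gif.Spec.Proved.gif_decode_3_ok Lay hLay μ hμ u₀ hcode.gif_decode h_DGifSlurp_COMPOSITION hgiven.asan_store4_noabort hgiven.asan_load4_noabort
  have h_gif_decode_COMPOSITION := Gif.Spec.Proved.gif_decode_COMPOSITION_ok Lay hLay μ hμ u₀ h_gif_decode_P h_gif_decode_1 h_gif_decode_2 h_gif_decode_3 h_gif_decode_4 h_gif_decode_5 h_gif_decode_E
  have h_prog_main_1 := Gif.Spec.Proved.prog_main_1_ok Lay hLay μ hμ u₀ hcode.prog_main h_gif_decode_COMPOSITION hgiven.memcpy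
  have h_prog_main_COMPOSITION := Gif.Spec.Proved.prog_main_COMPOSITION_ok Lay hLay μ hμ u₀ h_prog_main_P h_prog_main_1 h_prog_main_E
  exact {
    DGifBufferedInput_1 := h_DGifBufferedInput_1,
    DGifBufferedInput_E := h_DGifBufferedInput_E,
    DGifCloseFile_5 := h_DGifCloseFile_5,
    DGifDecompressInput_1 := h_DGifDecompressInput_1,
    DGifDecompressInput_3 := h_DGifDecompressInput_3,
    DGifDecompressInput_E := h_DGifDecompressInput_E,
    DGifDecompressInput_P := h_DGifDecompressInput_P,
    DGifDecompressLine_1 := h_DGifDecompressLine_1,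
    DGifDecompressLine_10 := h_DGifDecompressLine_10,
    DGifDecompressLine_11 := h_DGifDecompressLine_11,
    DGifDecompressLine_12 := h_DGifDecompressLine_12,
    DGifDecompressLine_13 := h_DGifDecompressLine_13,
    DGifDecompressLine_2 := h_DGifDecompressLine_2,
    DGifDecompressLine_4 := h_DGifDecompressLine_4,
    DGifDecompressLine_5 := h_DGifDecompressLine_5,
    DGifDecompressLine_6 := h_DGifDecompressLine_6,
    DGifDecompressLine_7 := h_DGifDecompressLine_7,
    DGifDecompressLine_E := h_DGifDecompressLine_E,
    DGifDecompressLine_P := h_DGifDecompressLine_P,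
    DGifDecreaseImageCounter_1 := h_DGifDecreaseImageCounter_1,
    DGifDecreaseImageCounter_E := h_DGifDecreaseImageCounter_E,
    DGifGetCodeNext_E := h_DGifGetCodeNext_E,
    DGifGetCodeNext_P := h_DGifGetCodeNext_P,
    DGifGetExtensionNext_E := h_DGifGetExtensionNext_E,
    DGifGetExtensionNext_P := h_DGifGetExtensionNext_P,
    DGifGetExtension_E := h_DGifGetExtension_E,
    DGifGetExtension_P := h_DGifGetExtension_P,
    DGifGetImageDesc_3 := h_DGifGetImageDesc_3,
    DGifGetImageDesc_4 := h_DGifGetImageDesc_4,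
    DGifGetImageDesc_6 := h_DGifGetImageDesc_6,
    DGifGetImageDesc_E := h_DGifGetImageDesc_E,
    DGifGetImageHeader_5 := h_DGifGetImageHeader_5,
    DGifGetImageHeader_E := h_DGifGetImageHeader_E,
    DGifGetImageHeader_P := h_DGifGetImageHeader_P,
    DGifGetLine_1 := h_DGifGetLine_1,
    DGifGetLine_E := h_DGifGetLine_E,
    DGifGetLine_P := h_DGifGetLine_P,
    DGifGetPrefixChar := h_DGifGetPrefixChar,
    DGifGetRecordType_2 := h_DGifGetRecordType_2,
    DGifGetRecordType_E := h_DGifGetRecordType_E,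
    DGifGetRecordType_P := h_DGifGetRecordType_P,
    DGifGetScreenDesc_3 := h_DGifGetScreenDesc_3,
    DGifGetScreenDesc_6 := h_DGifGetScreenDesc_6,
    DGifGetScreenDesc_E := h_DGifGetScreenDesc_E,
    DGifGetScreenDesc_P := h_DGifGetScreenDesc_P,
    DGifGetWord_E := h_DGifGetWord_E,
    DGifGetWord_P := h_DGifGetWord_P,
    DGifOpen_1 := h_DGifOpen_1,
    DGifOpen_2 := h_DGifOpen_2,
    DGifOpen_E := h_DGifOpen_E,
    DGifOpen_P := h_DGifOpen_P,
    DGifSetupDecompress_2 := h_DGifSetupDecompress_2,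
    DGifSetupDecompress_3 := h_DGifSetupDecompress_3,
    DGifSetupDecompress_E := h_DGifSetupDecompress_E,
    DGifSetupDecompress_P := h_DGifSetupDecompress_P,
    DGifSlurp_1 := h_DGifSlurp_1,
    DGifSlurp_12 := h_DGifSlurp_12,
    DGifSlurp_7 := h_DGifSlurp_7,
    DGifSlurp_9 := h_DGifSlurp_9,
    DGifSlurp_E := h_DGifSlurp_E,
    DGifSlurp_P := h_DGifSlurp_P,
    GifAddExtensionBlock_2 := h_GifAddExtensionBlock_2,
    GifAddExtensionBlock_3 := h_GifAddExtensionBlock_3,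
    GifAddExtensionBlock_E := h_GifAddExtensionBlock_E,
    GifBitSize := h_GifBitSize,
    GifFreeExtensions_1 := h_GifFreeExtensions_1,
    GifFreeExtensions_2 := h_GifFreeExtensions_2,
    GifFreeExtensions_COMPOSITION := h_GifFreeExtensions_COMPOSITION,
    GifFreeMapObject := h_GifFreeMapObject,
    GifFreeSavedImages_1 := h_GifFreeSavedImages_1,
    GifFreeSavedImages_2 := h_GifFreeSavedImages_2,
    GifFreeSavedImages_3 := h_GifFreeSavedImages_3,
    GifFreeSavedImages_COMPOSITION := h_GifFreeSavedImages_COMPOSITION,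
    GifMakeMapObject_1 := h_GifMakeMapObject_1,
    GifMakeMapObject_2 := h_GifMakeMapObject_2,
    GifMakeMapObject_E := h_GifMakeMapObject_E,
    digest_byte := h_digest_byte,
    digest_bytes := h_digest_bytes,
    digest_extensions_E := h_digest_extensions_E,
    digest_int := h_digest_int,
    digest_map_1 := h_digest_map_1,
    digest_map_2 := h_digest_map_2,
    digest_map_E := h_digest_map_E,
    gif_decode_1 := h_gif_decode_1,
    gif_decode_E := h_gif_decode_E,
    gif_decode_P := h_gif_decode_P,
    mem_read := h_mem_read,
    openbsd_reallocarray := h_openbsd_reallocarray,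
    prog_main_E := h_prog_main_E,
    prog_main_P := h_prog_main_P,
    strncmp := h_strncmp,
    sub_I_65535_1 := h_sub_I_65535_1,
    DGifCloseFile_1 := h_DGifCloseFile_1,
    DGifCloseFile_2 := h_DGifCloseFile_2,
    DGifCloseFile_3 := h_DGifCloseFile_3,
    DGifCloseFile_4 := h_DGifCloseFile_4,
    DGifCloseFile_COMPOSITION := h_DGifCloseFile_COMPOSITION,
    DGifDecompressLine_14 := h_DGifDecompressLine_14,
    DGifDecompressLine_15 := h_DGifDecompressLine_15,
    DGifDecompressLine_8 := h_DGifDecompressLine_8,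
    DGifDecompressLine_9 := h_DGifDecompressLine_9,
    DGifDecreaseImageCounter_2 := h_DGifDecreaseImageCounter_2,
    DGifDecreaseImageCounter_3 := h_DGifDecreaseImageCounter_3,
    DGifDecreaseImageCounter_COMPOSITION := h_DGifDecreaseImageCounter_COMPOSITION,
    DGifGetImageDesc_2 := h_DGifGetImageDesc_2,
    DGifOpen_4 := h_DGifOpen_4,
    DGifSlurp_4 := h_DGifSlurp_4,
    DGifSlurp_5 := h_DGifSlurp_5,
    GifAddExtensionBlock_1 := h_GifAddExtensionBlock_1,
    GifAddExtensionBlock_COMPOSITION := h_GifAddExtensionBlock_COMPOSITION,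
    GifMakeMapObject_COMPOSITION := h_GifMakeMapObject_COMPOSITION,
    InternalRead := h_InternalRead,
    digest_extensions_1 := h_digest_extensions_1,
    digest_extensions_2 := h_digest_extensions_2,
    digest_extensions_COMPOSITION := h_digest_extensions_COMPOSITION,
    digest_file_1 := h_digest_file_1,
    digest_file_2 := h_digest_file_2,
    digest_file_4 := h_digest_file_4,
    digest_file_5 := h_digest_file_5,
    digest_file_7 := h_digest_file_7,
    digest_map_COMPOSITION := h_digest_map_COMPOSITION,
    gif_decode_5 := h_gif_decode_5,
    run_ctors := h_run_ctors,
    DGifBufferedInput_2 := h_DGifBufferedInput_2,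
    DGifBufferedInput_3 := h_DGifBufferedInput_3,
    DGifBufferedInput_COMPOSITION := h_DGifBufferedInput_COMPOSITION,
    DGifDecompressInput_2 := h_DGifDecompressInput_2,
    DGifDecompressInput_COMPOSITION := h_DGifDecompressInput_COMPOSITION,
    DGifDecompressLine_3 := h_DGifDecompressLine_3,
    DGifDecompressLine_COMPOSITION := h_DGifDecompressLine_COMPOSITION,
    DGifGetCodeNext_1 := h_DGifGetCodeNext_1,
    DGifGetCodeNext_2 := h_DGifGetCodeNext_2,
    DGifGetCodeNext_COMPOSITION := h_DGifGetCodeNext_COMPOSITION,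
    DGifGetExtensionNext_1 := h_DGifGetExtensionNext_1,
    DGifGetExtensionNext_2 := h_DGifGetExtensionNext_2,
    DGifGetExtensionNext_COMPOSITION := h_DGifGetExtensionNext_COMPOSITION,
    DGifGetExtension_1 := h_DGifGetExtension_1,
    DGifGetExtension_2 := h_DGifGetExtension_2,
    DGifGetExtension_COMPOSITION := h_DGifGetExtension_COMPOSITION,
    DGifGetImageDesc_5 := h_DGifGetImageDesc_5,
    DGifGetImageHeader_3 := h_DGifGetImageHeader_3,
    DGifGetImageHeader_4 := h_DGifGetImageHeader_4,
    DGifGetLine_2 := h_DGifGetLine_2,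
    DGifGetLine_3 := h_DGifGetLine_3,
    DGifGetLine_COMPOSITION := h_DGifGetLine_COMPOSITION,
    DGifGetRecordType_1 := h_DGifGetRecordType_1,
    DGifGetRecordType_COMPOSITION := h_DGifGetRecordType_COMPOSITION,
    DGifGetScreenDesc_2 := h_DGifGetScreenDesc_2,
    DGifGetScreenDesc_4 := h_DGifGetScreenDesc_4,
    DGifGetScreenDesc_5 := h_DGifGetScreenDesc_5,
    DGifGetWord_1 := h_DGifGetWord_1,
    DGifGetWord_COMPOSITION := h_DGifGetWord_COMPOSITION,
    DGifOpen_3 := h_DGifOpen_3,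
    DGifSetupDecompress_1 := h_DGifSetupDecompress_1,
    DGifSetupDecompress_COMPOSITION := h_DGifSetupDecompress_COMPOSITION,
    DGifSlurp_10 := h_DGifSlurp_10,
    DGifSlurp_11 := h_DGifSlurp_11,
    DGifSlurp_2 := h_DGifSlurp_2,
    DGifSlurp_6 := h_DGifSlurp_6,
    DGifSlurp_8 := h_DGifSlurp_8,
    digest_file_3 := h_digest_file_3,
    digest_file_6 := h_digest_file_6,
    digest_file_COMPOSITION := h_digest_file_COMPOSITION,
    gif_decode_4 := h_gif_decode_4,
    DGifGetImageHeader_1 := h_DGifGetImageHeader_1,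
    DGifGetImageHeader_2 := h_DGifGetImageHeader_2,
    DGifGetImageHeader_6 := h_DGifGetImageHeader_6,
    DGifGetImageHeader_COMPOSITION := h_DGifGetImageHeader_COMPOSITION,
    DGifGetScreenDesc_1 := h_DGifGetScreenDesc_1,
    DGifGetScreenDesc_COMPOSITION := h_DGifGetScreenDesc_COMPOSITION,
    DGifOpen_5 := h_DGifOpen_5,
    DGifOpen_COMPOSITION := h_DGifOpen_COMPOSITION,
    gif_decode_2 := h_gif_decode_2,
    DGifGetImageDesc_1 := h_DGifGetImageDesc_1,
    DGifGetImageDesc_COMPOSITION := h_DGifGetImageDesc_COMPOSITION,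
    DGifSlurp_3 := h_DGifSlurp_3,
    DGifSlurp_COMPOSITION := h_DGifSlurp_COMPOSITION,
    gif_decode_3 := h_gif_decode_3,
    gif_decode_COMPOSITION := h_gif_decode_COMPOSITION,
    prog_main_1 := h_prog_main_1,
    prog_main_COMPOSITION := h_prog_main_COMPOSITION
  }

end Gif.Closed
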